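-- pv_equiv track=rewrite | github.com/Zjiongjiong/study | AR-CODE/test.py | combine_same
-- ===== SOURCE A (Python) =====
-- def MainElem(s):
--     count_C,count_E,count_H=0,0,0
--     for i in range(0,len(s)):
--         if s[i] == 'C':
--             count_C += 1
--         elif s[i] == 'E':
--             count_E += 1
--         else:
--             count_H += 1
--
--     if(count_C >= count_E):
--         main_elem_count = count_C
--         main_elem = 'C'
--     else:
--         main_elem_count = count_E
--         main_elem = 'E'
--     if (count_H > main_elem_count):
--         main_elem_count = count_H
--         main_elem = 'H'
--     return main_elem
--
-- def combine_same(slices):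
--     i = 0
--     while i < len(slices)-1:
--         if MainElem(slices[i]) == MainElem(slices[i + 1]):
--             for j in range(0, len(slices[i+1])):
--                 slices[i].append(slices[i+1][j])
--             slices[i+1].clear()
--             for j in range(i+1, len(slices) - 1):
--                 slices[j] = slices[j + 1]
--             slices.pop()
--         else:
--             i += 1
--     return slices
-- ===== SOURCE B (Python) =====
-- def combine_same(slices):
--     # Single pass keeping running (C,E,H) counts for the current merged group.
--     # Note: the original mutates `slices` in place; this returns a fresh list.
--     def counts(s):
--         c = e = h = 0
--         for x in s:
--             if x == 'C':
--                 c += 1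
--             elif x == 'E':
--                 e += 1
--             else:
--                 h += 1
--         return (c, e, h)
--
--     def main_of(t):
--         c, e, h = t
--         if c >= e:
--             mc, m = c, 'C'
--         else:
--             mc, m = e, 'E'
--         if h > mc:
--             return 'H'
--         return m
--
--     out = []
--     cur = None
--     cnt = None
--     for s in slices:
--         t = counts(s)
--         if cur is not None and main_of(cnt) == main_of(t):
--             cur = cur + s
--             cnt = (cnt[0] + t[0], cnt[1] + t[1], cnt[2] + t[2])
--         else:
--             if cur is not None:
--                 out.append(cur)
--             cur = s
--             cnt = t
--     if cur is not None:
--         out.append(cur)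
--     return out
-- ===== Notes on version B (the rewrite author's own statement) =====
-- stated objective: faster
-- what changed: Replaces the index-based while loop that re-scans merged slices with MainElem and shifts the tail left on every merge by a single left-to-right pass that keeps running (C,E,H) counts for the current group and appends finished groups to an output list.
import Mathlib
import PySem

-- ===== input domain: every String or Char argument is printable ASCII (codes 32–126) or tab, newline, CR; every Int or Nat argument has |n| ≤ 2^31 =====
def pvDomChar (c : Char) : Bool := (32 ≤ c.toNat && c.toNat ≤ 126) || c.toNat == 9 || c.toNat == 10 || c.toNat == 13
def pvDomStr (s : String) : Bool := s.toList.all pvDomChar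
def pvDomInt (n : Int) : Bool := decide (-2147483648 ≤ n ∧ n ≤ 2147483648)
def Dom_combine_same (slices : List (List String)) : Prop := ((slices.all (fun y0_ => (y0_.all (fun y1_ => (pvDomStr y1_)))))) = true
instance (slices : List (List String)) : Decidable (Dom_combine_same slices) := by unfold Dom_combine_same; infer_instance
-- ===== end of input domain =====

-- B replaces A's quadratic merge-and-shift loop by one pass with running (C,E,H) counts;
-- equivalence is about the RETURN value only (A mutates its argument in place, B does not).

-- ===== PORT A =====
-- counts of 'C' / 'E' / other in s, then the dominant label (A's MainElem)
def pvMainElem (s : List String) : String :=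
  let cnt := s.foldl (fun (a : Nat × Nat × Nat) x =>
      if x == "C" then (a.1 + 1, a.2.1, a.2.2)
      else if x == "E" then (a.1, a.2.1 + 1, a.2.2)
      else (a.1, a.2.1, a.2.2 + 1)) (0, 0, 0)
  let me := if cnt.1 ≥ cnt.2.1 then (cnt.1, "C") else (cnt.2.1, "E")
  if cnt.2.2 > me.1 then "H" else me.2

-- A's while loop: on a merge, slices[i] is extended with slices[i+1] and the tail is
-- shifted left over position i+1 (append loop + clear + shift + pop = set, then eraseIdx)
def pvLoopA (slices : List (List String)) (i : Nat) : List (List String) :=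
  if h : i < slices.length - 1 then
    if pvMainElem (slices.getD i []) == pvMainElem (slices.getD (i + 1) []) then
      pvLoopA ((slices.set i (slices.getD i [] ++ slices.getD (i + 1) [])).eraseIdx (i + 1)) i
    else
      pvLoopA slices (i + 1)
  else slices
termination_by slices.length - i
decreasing_by
  · have h2 : i + 1 < slices.length := by omega
    simp only [List.length_eraseIdx, List.length_set, h2, if_pos]
    omega
  · omega

def combine_same (slices : List (List String)) : List (List String) :=
  pvLoopA slices 0

-- ===== PORT B =====
-- B's counts helper
def pvCounts (s : List String) : Nat × Nat × Nat :=
  s.foldl (fun (a : Nat × Nat × Nat) x =>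
      if x == "C" then (a.1 + 1, a.2.1, a.2.2)
      else if x == "E" then (a.1, a.2.1 + 1, a.2.2)
      else (a.1, a.2.1, a.2.2 + 1)) (0, 0, 0)

-- B's main_of helper
def pvMainOf (cnt : Nat × Nat × Nat) : String :=
  let me := if cnt.1 ≥ cnt.2.1 then (cnt.1, "C") else (cnt.2.1, "E")
  if cnt.2.2 > me.1 then "H" else me.2

-- one step of B's loop: state = (finished groups, current group with its counts)
def pvStepB (st : List (List String) × Option (List String × (Nat × Nat × Nat)))
    (s : List String) : List (List String) × Option (List String × (Nat × Nat × Nat)) :=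
  let t := pvCounts s
  match st.2 with
  | some (cur, cnt) =>
      if pvMainOf cnt == pvMainOf t then
        (st.1, some (cur ++ s, (cnt.1 + t.1, cnt.2.1 + t.2.1, cnt.2.2 + t.2.2)))
      else
        (st.1 ++ [cur], some (s, t))
  | none => (st.1, some (s, t))

-- B's trailing "if cur is not None: out.append(cur)"
def pvFinishB (st : List (List String) × Option (List String × (Nat × Nat × Nat))) :
    List (List String) :=
  match st.2 with
  | some (cur, _) => st.1 ++ [cur]
  | none => st.1

def combine_same_alt (slices : List (List String)) : List (List String) :=
  pvFinishB (slices.foldl pvStepB ([], none))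

-- ===== PRECONDITION & SPEC =====
def Spec_combine_same (slices : List (List String)) (out : List (List String)) : Prop := out = combine_same_alt slices
instance (slices : List (List String)) (out : List (List String)) : Decidable (Spec_combine_same slices out) := by unfold Spec_combine_same; infer_instance

-- ===== CLAIM (what is proved, stated in full; the proofs are below) =====
def Claim_equal_combine_same : Prop := ∀ (slices : List (List String)), Dom_combine_same slices → Spec_combine_same slices (combine_same slices)

-- ===== LEMMAS AND PROOFS =====

-- proof-side canonical recursion both ports are reduced to
def pvRest : List (List String) → List (List String)
  | [] => []
  | [s] => [s]
  | s :: t :: rest =>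
      if pvMainElem s == pvMainElem t then pvRest ((s ++ t) :: rest)
      else s :: pvRest (t :: rest)
termination_by l => l.length

theorem pvRest_nil : pvRest [] = [] := by simp [pvRest]

theorem pvRest_single (s : List String) : pvRest [s] = [s] := by simp [pvRest]

theorem pvRest_cons2 (s t : List String) (rest : List (List String)) :
    pvRest (s :: t :: rest)
      = if pvMainElem s == pvMainElem t then pvRest ((s ++ t) :: rest)
        else s :: pvRest (t :: rest) := by
  rw [pvRest]

theorem pvRest_short (l : List (List String)) (h : l.length ≤ 1) : pvRest l = l := by
  match l with
  | [] => exact pvRest_nil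
  | [s] => exact pvRest_single s
  | a :: b :: r => simp at h

theorem pvMainElem_eq (s : List String) : pvMainElem s = pvMainOf (pvCounts s) := rfl

theorem pvCounts_shift (b : List String) (c e h : Nat) :
    b.foldl (fun (a : Nat × Nat × Nat) x =>
      if x == "C" then (a.1 + 1, a.2.1, a.2.2)
      else if x == "E" then (a.1, a.2.1 + 1, a.2.2)
      else (a.1, a.2.1, a.2.2 + 1)) (c, e, h)
    = (c + (pvCounts b).1, e + (pvCounts b).2.1, h + (pvCounts b).2.2) := by
  induction b generalizing c e h with
  | nil => simp [pvCounts]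
  | cons x xs ih =>
      simp only [pvCounts, List.foldl_cons]
      split_ifs with h1 h2 <;> rw [ih, ih] <;> simp <;> omega

theorem pvCounts_append (a b : List String) :
    pvCounts (a ++ b) = ((pvCounts a).1 + (pvCounts b).1,
      (pvCounts a).2.1 + (pvCounts b).2.1, (pvCounts a).2.2 + (pvCounts b).2.2) := by
  have h := pvCounts_shift b (pvCounts a).1 (pvCounts a).2.1 (pvCounts a).2.2
  simp only [pvCounts, List.foldl_append] at *
  exact h

-- the merge step of A: set at i, then erase i+1
theorem pv_merge_eq (slices : List (List String)) (i : Nat) (x : List String)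
    (h : i + 1 < slices.length) :
    (slices.set i x).eraseIdx (i + 1) = slices.take i ++ x :: slices.drop (i + 2) := by
  induction slices generalizing i with
  | nil => simp at h
  | cons s rest ih =>
      cases i with
      | zero =>
          simp only [List.set]
          cases rest with
          | nil => simp at h
          | cons b r => simp [List.eraseIdx]
      | succ j =>
          simp only [List.set, List.eraseIdx, List.take, List.drop]
          have := ih j (by simpa using Nat.lt_of_succ_lt_succ h)
          simp [this]

theorem pvLoopA_eq (slices : List (List String)) (i : Nat) :
    pvLoopA slices i = slices.take i ++ pvRest (slices.drop i) := by
  induction slices, i using pvLoopA.induct with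
  | case1 slices i h heq ih =>
      rw [pvLoopA]; simp only [h, dite_true, heq, if_true]
      have hi : i < slices.length := by omega
      have hi1 : i + 1 < slices.length := by omega
      have ha : slices.getD i [] = slices[i] := List.getD_eq_getElem slices [] hi
      have hb : slices.getD (i+1) [] = slices[i+1] := List.getD_eq_getElem slices [] hi1
      rw [ih]
      have hm : (slices.set i (slices.getD i [] ++ slices.getD (i+1) [])).eraseIdx (i+1)
          = slices.take i ++ (slices[i] ++ slices[i+1]) :: slices.drop (i+2) := by
        rw [pv_merge_eq _ _ _ hi1, ha, hb]
      rw [hm]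
      have hlen : (slices.take i).length = i := List.length_take_of_le (by omega)
      have htake : (slices.take i ++ (slices[i] ++ slices[i+1]) :: slices.drop (i+2)).take i
          = slices.take i := by
        rw [List.take_append_of_le_length (by omega), List.take_take]
        simp
      have hdrop : (slices.take i ++ (slices[i] ++ slices[i+1]) :: slices.drop (i+2)).drop i
          = (slices[i] ++ slices[i+1]) :: slices.drop (i+2) := by
        rw [List.drop_append_of_le_length (by omega)]
        simp
      rw [htake, hdrop]
      have hd : slices.drop i = slices[i] :: slices[i+1] :: slices.drop (i+2) := by
        rw [List.drop_eq_getElem_cons hi, List.drop_eq_getElem_cons hi1]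
      have hmm : (pvMainElem slices[i] == pvMainElem slices[i+1]) = true := by
        rw [← ha, ← hb]; exact heq
      rw [hd, pvRest_cons2, if_pos hmm]
  | case2 slices i h heq ih =>
      rw [pvLoopA]; simp only [h, dite_true]
      rw [if_neg heq, ih]
      have hi : i < slices.length := by omega
      have hi1 : i + 1 < slices.length := by omega
      have hd : slices.drop i = slices[i] :: slices[i+1] :: slices.drop (i+2) := by
        rw [List.drop_eq_getElem_cons hi, List.drop_eq_getElem_cons hi1]
      have hd1 : slices.drop (i+1) = slices[i+1] :: slices.drop (i+2) :=
        List.drop_eq_getElem_cons hi1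
      have ha : slices.getD i [] = slices[i] := List.getD_eq_getElem slices [] hi
      have hb : slices.getD (i+1) [] = slices[i+1] := List.getD_eq_getElem slices [] hi1
      have hmm : ¬ (pvMainElem slices[i] == pvMainElem slices[i+1]) = true := by
        rw [← ha, ← hb]; exact heq
      rw [hd, pvRest_cons2, if_neg hmm, ← hd1]
      have ht : List.take (i+1) slices = List.take i slices ++ [slices[i]] := by
        rw [List.take_add_one, List.getElem?_eq_getElem hi]; rfl
      rw [ht, List.append_assoc, List.singleton_append]
  | case3 slices i h =>
      rw [pvLoopA]; simp only [h, dite_false]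
      have hle : (slices.drop i).length ≤ 1 := by simp; omega
      rw [pvRest_short _ hle, List.take_append_drop]

theorem pvFoldB_eq (rest : List (List String)) (out : List (List String)) (cur : List String) :
    pvFinishB (rest.foldl pvStepB (out, some (cur, pvCounts cur))) = out ++ pvRest (cur :: rest) := by
  induction rest generalizing out cur with
  | nil => simp [pvFinishB, pvRest_single]
  | cons s rest' ih =>
      simp only [List.foldl_cons]
      by_cases hm : (pvMainOf (pvCounts cur) == pvMainOf (pvCounts s)) = true
      · have hstep : pvStepB (out, some (cur, pvCounts cur)) s
            = (out, some (cur ++ s, ((pvCounts cur).1 + (pvCounts s).1,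
                (pvCounts cur).2.1 + (pvCounts s).2.1, (pvCounts cur).2.2 + (pvCounts s).2.2))) := by
          simp [pvStepB, hm]
        rw [hstep, ← pvCounts_append, ih]
        have hmm : (pvMainElem cur == pvMainElem s) = true := by
          simpa [pvMainElem_eq] using hm
        rw [pvRest_cons2, if_pos hmm]
      · have hstep : pvStepB (out, some (cur, pvCounts cur)) s
            = (out ++ [cur], some (s, pvCounts s)) := by
          simp [pvStepB, hm]
        rw [hstep, ih]
        have hmm : ¬ (pvMainElem cur == pvMainElem s) = true := by
          simpa [pvMainElem_eq] using hm
        rw [pvRest_cons2, if_neg hmm]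
        simp

theorem ports_eq (slices : List (List String)) :
    combine_same slices = combine_same_alt slices := by
  unfold combine_same combine_same_alt
  rw [pvLoopA_eq]
  simp only [List.take_zero, List.drop_zero, List.nil_append]
  cases slices with
  | nil => simp [pvRest_nil, pvFinishB]
  | cons s rest =>
      have hstep : pvStepB ([], none) s = ([], some (s, pvCounts s)) := by
        simp [pvStepB]
      rw [List.foldl_cons, hstep, pvFoldB_eq]
      simp

-- ===== VERDICT (by name: the statement is the Claim_ definition above) =====
theorem combine_same_spec : Claim_equal_combine_same := by
  intro slices _
  exact ports_eq slices
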